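-- pv_equiv track=rewrite | github.com/428amp/Misc | EPI/10.2_IncreasingDecreasingSort.py | getInflecs
-- ===== SOURCE A (Python) =====
-- def getInflecs(A):
--   infl = []
--   increasing = True
--   for i in range(1, len(A)):
--     if (A[i] < A[i-1] and increasing) or (A[i] > A[i-1] and not increasing):
--       increasing ^= 1
--       infl.append(i)
--   return infl
-- ===== SOURCE B (Python) =====
-- def getInflecs(A):
--   # sign table of strict comparisons, then run-length grouping of equal signs
--   signs = [(i, 1 if A[i] > A[i-1] else -1) for i in range(1, len(A)) if A[i] != A[i-1]]
--   runs = []  # (start_index, sign) of each maximal run of equal sign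
--   for p in signs:
--     if not runs or runs[-1][1] != p[1]:
--       runs.append(p)
--   starts = [i for i, s in runs]
--   # a leading increasing run matches the initial assumption and is not an inflection
--   return starts[1:] if runs and runs[0][1] == 1 else starts
-- ===== Notes on version B (the rewrite author's own statement) =====
-- stated objective: alternative
-- what changed: Replaces the one-pass direction-flipping FSM with a two-phase decomposition: build a filtered (index, sign) table of strict comparisons, run-length group it into maximal equal-sign runs, and return the run start indices (dropping a leading increasing run).
import Mathlib
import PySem

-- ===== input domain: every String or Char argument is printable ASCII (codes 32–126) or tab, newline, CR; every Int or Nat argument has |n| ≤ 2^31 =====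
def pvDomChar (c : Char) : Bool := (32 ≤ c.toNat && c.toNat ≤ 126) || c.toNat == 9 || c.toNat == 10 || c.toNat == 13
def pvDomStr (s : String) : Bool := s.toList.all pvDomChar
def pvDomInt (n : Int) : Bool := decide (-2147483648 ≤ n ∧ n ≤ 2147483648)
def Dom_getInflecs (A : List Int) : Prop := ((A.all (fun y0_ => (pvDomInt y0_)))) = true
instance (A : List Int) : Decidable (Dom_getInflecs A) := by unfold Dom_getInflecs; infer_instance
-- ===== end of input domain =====

-- B run-length groups a filtered sign table instead of A's one-pass flipping FSM; alternative decomposition, same cost.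

-- ===== PORT A =====
-- loop body of A's for-loop (state = (increasing, infl))
def stepA (A : List Int) (st : Bool × List Int) (i : Int) : Bool × List Int :=
  if (decide (PySem.List.pyGetD A i 0 < PySem.List.pyGetD A (i-1) 0) && st.1)
     || (decide (PySem.List.pyGetD A i 0 > PySem.List.pyGetD A (i-1) 0) && !st.1)
  then (!st.1, st.2 ++ [i]) else st

def getInflecs (A : List Int) : List Int :=
  ((PySem.List.pyRange 1 (A.length : Int) 1).foldl (stepA A) (true, ([] : List Int))).2

-- ===== PORT B =====
-- comprehension filter 'A[i] != A[i-1]'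
def fltB (A : List Int) (i : Int) : Bool :=
  PySem.List.pyGetD A i 0 != PySem.List.pyGetD A (i-1) 0
-- comprehension element '(i, 1 if A[i] > A[i-1] else -1)'
def sgnB (A : List Int) (i : Int) : Int × Int :=
  (i, if PySem.List.pyGetD A i 0 > PySem.List.pyGetD A (i-1) 0 then (1:Int) else -1)
-- loop body of B's run-grouping loop
def stepB (runs : List (Int × Int)) (p : Int × Int) : List (Int × Int) :=
  if runs.isEmpty || (PySem.List.pyGetD runs (-1) ((0:Int),(0:Int))).2 != p.2
  then runs ++ [p] else runs

def getInflecs_alt (A : List Int) : List Int :=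
  let signs : List (Int × Int) :=
    ((PySem.List.pyRange 1 (A.length : Int) 1).filter (fltB A)).map (sgnB A)
  let runs : List (Int × Int) := signs.foldl stepB []
  let starts : List Int := runs.map (fun p => p.1)
  if !runs.isEmpty && (PySem.List.pyGetD runs 0 ((0:Int),(0:Int))).2 == 1
  then PySem.List.slice starts (some 1) none
  else starts

-- ===== PRECONDITION & SPEC =====
def Spec_getInflecs (A : List Int) (out : List Int) : Prop := out = getInflecs_alt A
instance (A : List Int) (out : List Int) : Decidable (Spec_getInflecs A out) := by unfold Spec_getInflecs; infer_instance

-- ===== CLAIM (what is proved, stated in full; the proofs are below) =====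
def Claim_equal_getInflecs : Prop := ∀ (A : List Int), Dom_getInflecs A → Spec_getInflecs A (getInflecs A)

-- ===== LEMMAS AND PROOFS =====

-- the change-point scan over an index list, previous sign q (±1)
def chgI (A : List Int) (q : Int) : List Int → List Int
  | [] => []
  | i :: t =>
      if PySem.List.pyGetD A i 0 < PySem.List.pyGetD A (i-1) 0 ∧ q = 1 then i :: chgI A (-1) t
      else if PySem.List.pyGetD A i 0 > PySem.List.pyGetD A (i-1) 0 ∧ q = -1 then i :: chgI A 1 t
      else chgI A q t

-- the run-start pairs of a sign list, previous sign q
def chgP (q : Int) : List (Int × Int) → List (Int × Int)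
  | [] => []
  | p :: t => if p.2 ≠ q then p :: chgP p.2 t else chgP q t

-- A's fold computes the change-point scan
theorem foldA_eq_chgI (A : List Int) (l : List Int) (inc : Bool) (acc : List Int) :
    (l.foldl (stepA A) (inc, acc)).2 = acc ++ chgI A (if inc then 1 else -1) l := by
  induction l generalizing inc acc with
  | nil => simp [chgI]
  | cons i t ih =>
    rw [List.foldl_cons]
    rcases lt_trichotomy (PySem.List.pyGetD A i 0) (PySem.List.pyGetD A (i-1) 0) with h | h | h
    · have hgt : ¬ PySem.List.pyGetD A i 0 > PySem.List.pyGetD A (i-1) 0 := by omega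
      cases inc
      · have hstep : stepA A (false, acc) i = (false, acc) := by simp [stepA, h, hgt]
        rw [hstep, ih]; simp [chgI, h, hgt]
      · have hstep : stepA A (true, acc) i = (false, acc ++ [i]) := by simp [stepA, h, hgt]
        rw [hstep, ih]; simp [chgI, h, hgt]
    · have hlt : ¬ PySem.List.pyGetD A i 0 < PySem.List.pyGetD A (i-1) 0 := by omega
      have hgt : ¬ PySem.List.pyGetD A i 0 > PySem.List.pyGetD A (i-1) 0 := by omega
      cases inc
      · have hstep : stepA A (false, acc) i = (false, acc) := by simp [stepA, hlt, hgt]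
        rw [hstep, ih]; simp [chgI, hlt, hgt]
      · have hstep : stepA A (true, acc) i = (true, acc) := by simp [stepA, hlt, hgt]
        rw [hstep, ih]; simp [chgI, hlt, hgt]
    · have hlt : ¬ PySem.List.pyGetD A i 0 < PySem.List.pyGetD A (i-1) 0 := by omega
      cases inc
      · have hstep : stepA A (false, acc) i = (true, acc ++ [i]) := by simp [stepA, hlt, h]
        rw [hstep, ih]; simp [chgI, hlt, h]
      · have hstep : stepA A (true, acc) i = (true, acc) := by simp [stepA, hlt, h]
        rw [hstep, ih]; simp [chgI, hlt, h]

-- B's run fold appends exactly the run-start pairs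
theorem foldB_eq_chgP (L : List (Int × Int)) (runs0 : List (Int × Int)) (h : runs0 ≠ []) :
    L.foldl stepB runs0 = runs0 ++ chgP ((runs0.getLast h).2) L := by
  induction L generalizing runs0 with
  | nil => simp [chgP]
  | cons p t ih =>
    rw [List.foldl_cons]
    by_cases hne : p.2 = (runs0.getLast h).2
    · have hstep : stepB runs0 p = runs0 := by
        unfold stepB
        rw [PySem.List.pyGetD_neg_one runs0 ((0:Int),(0:Int)) h]
        simp [h, hne]
      rw [hstep, ih runs0 h]
      simp [chgP, hne]
    · have hstep : stepB runs0 p = runs0 ++ [p] := by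
        unfold stepB
        rw [PySem.List.pyGetD_neg_one runs0 ((0:Int),(0:Int)) h]
        simp [h, bne, Ne.symm hne]
      have hns : runs0 ++ [p] ≠ [] := by simp
      rw [hstep, ih (runs0 ++ [p]) hns]
      have hlast : ((runs0 ++ [p]).getLast hns) = p := List.getLast_append_singleton ..
      rw [hlast]
      simp [chgP, hne]

-- run starts of the filtered sign table = change-point scan over the raw index list
theorem chgP_filter_eq_chgI (A : List Int) (l : List Int) (q : Int) (hq : q = 1 ∨ q = -1) :
    (chgP q ((l.filter (fltB A)).map (sgnB A))).map (fun p => p.1) = chgI A q l := by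
  induction l generalizing q with
  | nil => simp [chgP, chgI]
  | cons i t ih =>
    rw [List.filter_cons]
    rcases lt_trichotomy (PySem.List.pyGetD A i 0) (PySem.List.pyGetD A (i-1) 0) with h | h | h
    · have hgt : ¬ PySem.List.pyGetD A i 0 > PySem.List.pyGetD A (i-1) 0 := by omega
      have hf : fltB A i = true := by simp [fltB, bne]; omega
      have hs : sgnB A i = (i, -1) := by simp [sgnB, hgt]
      rw [if_pos hf, List.map_cons, hs]
      rcases hq with rfl | rfl <;>
        simp [chgP, chgI, h, hgt, ih (-1) (Or.inr rfl)]
    · have hlt : ¬ PySem.List.pyGetD A i 0 < PySem.List.pyGetD A (i-1) 0 := by omega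
      have hgt : ¬ PySem.List.pyGetD A i 0 > PySem.List.pyGetD A (i-1) 0 := by omega
      have hf : fltB A i = false := by simp [fltB, bne, h]
      rw [hf]
      simp [chgI, hlt, hgt, ih q hq]
    · have hlt : ¬ PySem.List.pyGetD A i 0 < PySem.List.pyGetD A (i-1) 0 := by omega
      have hf : fltB A i = true := by simp [fltB, bne]; omega
      have hs : sgnB A i = (i, 1) := by simp [sgnB, h]
      rw [if_pos hf, List.map_cons, hs]
      rcases hq with rfl | rfl <;>
        simp [chgP, chgI, h, hlt, ih 1 (Or.inl rfl)]

-- ===== VERDICT (by name: the statement is the Claim_ definition above) =====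
theorem getInflecs_spec : Claim_equal_getInflecs := by
  intro A _
  unfold Spec_getInflecs getInflecs getInflecs_alt
  rw [foldA_eq_chgI]
  simp only [if_pos rfl, List.nil_append, reduceIte]
  rcases hsgn : ((PySem.List.pyRange 1 (A.length : Int) 1).filter (fltB A)).map (sgnB A)
    with _ | ⟨p, t⟩
  · have hchg := chgP_filter_eq_chgI A (PySem.List.pyRange 1 (A.length : Int) 1) 1 (Or.inl rfl)
    rw [hsgn] at hchg
    simp only [chgP, List.map_nil] at hchg
    simp [← hchg]
  · have hstep : stepB [] p = [p] := by simp [stepB]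
    have hne : ([p] : List (Int × Int)) ≠ [] := by simp
    have hlast : (([p] : List (Int × Int)).getLast hne) = p := rfl
    rw [List.foldl_cons, hstep, foldB_eq_chgP t [p] hne, hlast]
    -- p's sign is ±1
    have hp2 : p.2 = 1 ∨ p.2 = -1 := by
      have hmem : p ∈ ((PySem.List.pyRange 1 (A.length : Int) 1).filter (fltB A)).map (sgnB A) := by
        rw [hsgn]; exact List.mem_cons_self ..
      obtain ⟨i, -, rfl⟩ := List.mem_map.mp hmem
      by_cases hgt : PySem.List.pyGetD A i 0 > PySem.List.pyGetD A (i-1) 0 <;> simp [sgnB, hgt]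
    have hchg := chgP_filter_eq_chgI A (PySem.List.pyRange 1 (A.length : Int) 1) 1 (Or.inl rfl)
    rw [hsgn] at hchg
    simp only [chgP] at hchg
    rcases hp2 with h1 | h1
    · -- leading increasing run: dropped by B, never recorded by A
      simp only [h1, ne_eq, not_true_eq_false, reduceIte] at hchg ⊢
      rw [← hchg]
      simp [PySem.List.slice_from_one, PySem.List.pyGetD_zero_cons, h1]
    · simp only [h1, ne_eq, reduceIte] at hchg ⊢
      rw [← hchg]
      simp [PySem.List.pyGetD_zero_cons, h1]
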